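-- pv_equiv track=rewrite | github.com/vaishnn/Column-Generation | Quak Cranes/patterns.py | generate_patterns
-- ===== SOURCE A (Python) =====
-- def generate_patterns(n, k, m, pattern=[]):
--     patterns = []
--
--     if len(pattern) == n:
--         if sum(pattern) == m:
--             patterns.append(pattern.copy())
--         return patterns
--
--     for i in range(k + 1):
--         if sum(pattern) + i <= m:
--             patterns += generate_patterns(n, k, m, pattern + [i])
--
--     return patterns
-- ===== SOURCE B (Python) =====
-- def generate_patterns(n, k, m, pattern=[]):
--     rem = n - len(pattern)
--     if rem < 0:
--         return []
--     frontier = [(list(pattern), sum(pattern))]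
--     for _ in range(rem):
--         if not frontier:
--             break
--         frontier = [(c + [i], s + i)
--                     for (c, s) in frontier
--                     for i in range(k + 1)
--                     if s + i <= m]
--     return [c for (c, s) in frontier if s == m]
-- ===== Notes on version B (the rewrite author's own statement) =====
-- stated objective: faster
-- what changed: Replaced the recursive depth-first search by an iterative breadth-first frontier of (partial pattern, running sum) pairs built level by level with the same pruning, so sums are never recomputed and the loop exits as soon as the frontier is empty.
import Mathlib
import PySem

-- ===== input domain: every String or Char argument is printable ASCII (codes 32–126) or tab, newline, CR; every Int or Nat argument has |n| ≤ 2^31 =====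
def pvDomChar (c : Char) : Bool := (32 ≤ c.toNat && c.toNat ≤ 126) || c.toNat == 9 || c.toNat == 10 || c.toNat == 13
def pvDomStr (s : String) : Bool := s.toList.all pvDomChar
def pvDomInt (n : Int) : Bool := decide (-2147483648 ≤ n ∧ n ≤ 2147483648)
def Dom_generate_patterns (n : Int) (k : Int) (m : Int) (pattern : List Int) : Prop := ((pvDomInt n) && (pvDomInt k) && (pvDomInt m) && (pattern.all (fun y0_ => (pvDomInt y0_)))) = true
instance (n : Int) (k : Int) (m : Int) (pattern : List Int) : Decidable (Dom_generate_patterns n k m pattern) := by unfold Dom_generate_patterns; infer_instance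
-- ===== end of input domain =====

-- B replaces A's pruned recursive DFS by an iterative breadth-first frontier that carries
-- each partial pattern with its running sum (never recomputing sums, exiting early on an empty
-- frontier), same pruning and output order (objective: faster, measured).

-- sum(xs)
def pySum (xs : List Int) : Int := xs.foldl (· + ·) 0

-- ===== PORT A =====
-- A's recursion extends `pattern` until its length reaches n; the fuel equals the
-- remaining depth (n - len(pattern)) and is consumed one step per recursive call,
-- so on every input where the Python returns, the fuel never runs out.
def generate_patterns_go (n : Int) (k : Int) (m : Int) (pattern : List Int) : Nat → List (List Int)
  | 0 => []  -- unreachable whenever the Python A returns (fuel = remaining depth + 1)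
  | fuel + 1 =>
    if (pattern.length : Int) = n then
      (if pySum pattern = m then [pattern] else [])
    else
      (PySem.List.pyRange 0 (k + 1) 1).foldl
        (fun acc i =>
          if pySum pattern + i ≤ m then acc ++ generate_patterns_go n k m (pattern ++ [i]) fuel
          else acc) []

def generate_patterns (n : Int) (k : Int) (m : Int) (pattern : List Int) : List (List Int) :=
  generate_patterns_go n k m pattern ((n - pattern.length).toNat + 1)

-- ===== PORT B =====
-- one level of the frontier: [(c + [i], s + i) for (c, s) in frontier for i in range(k+1) if s + i <= m]
def gp_level (k : Int) (m : Int) (frontier : List (List Int × Int)) : List (List Int × Int) :=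
  frontier.flatMap (fun cs =>
    ((PySem.List.pyRange 0 (k + 1) 1).filter (fun i => decide (cs.2 + i ≤ m))).map
      (fun i => (cs.1 ++ [i], cs.2 + i)))

-- the 'for _ in range(rem)' loop with its early 'if not frontier: break'
def gp_loop (k : Int) (m : Int) : Nat → List (List Int × Int) → List (List Int × Int)
  | 0, fr => fr
  | r + 1, fr => if fr = [] then [] else gp_loop k m r (gp_level k m fr)

def generate_patterns_alt (n : Int) (k : Int) (m : Int) (pattern : List Int) : List (List Int) :=
  let rem : Int := n - pattern.length
  if rem < 0 then []
  else
    ((gp_loop k m rem.toNat [(pattern, pySum pattern)]).filter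
        (fun cs => decide (cs.2 = m))).map
      (fun cs => cs.1)

-- ===== PRECONDITION & SPEC =====
-- Pre_ excludes exactly the inputs on which A recurses forever (RecursionError):
-- len(pattern) > n while sum(pattern) ≤ m and k ≥ 0.
def Pre_generate_patterns (n : Int) (k : Int) (m : Int) (pattern : List Int) : Prop :=
  (pattern.length : Int) ≤ n ∨ m < pySum pattern ∨ k < 0
instance (n : Int) (k : Int) (m : Int) (pattern : List Int) : Decidable (Pre_generate_patterns n k m pattern) := by unfold Pre_generate_patterns; infer_instance

def pvWitness_generate_patterns : Int × Int × Int × List Int := (2, 1, 2, [1])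

def Spec_generate_patterns (n : Int) (k : Int) (m : Int) (pattern : List Int) (out : List (List Int)) : Prop := out = generate_patterns_alt n k m pattern
instance (n : Int) (k : Int) (m : Int) (pattern : List Int) (out : List (List Int)) : Decidable (Spec_generate_patterns n k m pattern out) := by unfold Spec_generate_patterns; infer_instance

-- ===== CLAIM (what is proved, stated in full; the proofs are below) =====
def Claim_equal_generate_patterns : Prop := ∀ (n : Int) (k : Int) (m : Int) (pattern : List Int), Dom_generate_patterns n k m pattern → Pre_generate_patterns n k m pattern → Spec_generate_patterns n k m pattern (generate_patterns n k m pattern)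

-- ===== LEMMAS AND PROOFS =====

theorem foldl_append_ite_list {α β : Type} (l : List α) (p : α → Prop) [DecidablePred p]
    (f : α → List β) (acc : List β) :
    l.foldl (fun acc x => if p x then acc ++ f x else acc) acc
      = acc ++ (l.filter (fun x => decide (p x))).flatMap f := by
  induction l generalizing acc with
  | nil => simp
  | cons a l ih =>
    simp only [List.foldl_cons, List.filter_cons]
    by_cases h : p a <;> simp [h, ih, List.flatMap_cons]

theorem pySum_shift (xs : List Int) (a : Int) :
    xs.foldl (· + ·) a = a + xs.foldl (· + ·) 0 := by
  induction xs generalizing a with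
  | cons x xs ih => simp only [List.foldl_cons]; rw [ih (a + x), ih (0 + x)]; omega
  | nil => simp

theorem pySum_cons (i : Int) (c : List Int) : pySum (i :: c) = i + pySum c := by
  simp only [pySum, List.foldl_cons]
  simpa using pySum_shift c i

theorem pySum_append (xs ys : List Int) : pySum (xs ++ ys) = pySum xs + pySum ys := by
  induction xs with
  | nil => simp [pySum]
  | cons a xs ih => simp only [List.cons_append, pySum_cons, ih]; omega

-- r applications of gp_level, in the shape the proofs recurse on
def gp_iter (k m : Int) : Nat → List (List Int × Int) → List (List Int × Int)
  | 0, fr => fr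
  | r + 1, fr => gp_level k m (gp_iter k m r fr)

theorem gp_iter_succ_inner (k m : Int) (r : Nat) (fr : List (List Int × Int)) :
    gp_iter k m (r + 1) fr = gp_iter k m r (gp_level k m fr) := by
  induction r generalizing fr with
  | zero => simp [gp_iter]
  | succ r ih =>
    have h1 : gp_iter k m (r + 1 + 1) fr = gp_level k m (gp_iter k m (r + 1) fr) := rfl
    rw [h1, ih fr]
    rfl

theorem gp_level_append (k m : Int) (fr1 fr2 : List (List Int × Int)) :
    gp_level k m (fr1 ++ fr2) = gp_level k m fr1 ++ gp_level k m fr2 := by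
  simp [gp_level]

theorem gp_iter_append (k m : Int) (r : Nat) (fr1 fr2 : List (List Int × Int)) :
    gp_iter k m r (fr1 ++ fr2) = gp_iter k m r fr1 ++ gp_iter k m r fr2 := by
  induction r with
  | zero => simp [gp_iter]
  | succ r ih => simp [gp_iter, ih, gp_level_append]

theorem gp_iter_nil (k m : Int) (r : Nat) : gp_iter k m r [] = [] := by
  induction r with
  | zero => rfl
  | succ r ih => simp [gp_iter, ih, gp_level]

-- B's loop (with its early exit on an empty frontier) computes gp_iter
theorem gp_loop_eq_iter (k m : Int) (r : Nat) (fr : List (List Int × Int)) :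
    gp_loop k m r fr = gp_iter k m r fr := by
  induction r generalizing fr with
  | zero => rfl
  | succ r ih =>
    rw [show gp_loop k m (r + 1) fr = if fr = [] then [] else gp_loop k m r (gp_level k m fr)
      from rfl]
    by_cases hfr : fr = []
    · rw [if_pos hfr, hfr, gp_iter_nil]
    · rw [if_neg hfr, ih, gp_iter_succ_inner]

-- a frontier is processed seed by seed
theorem gp_iter_flatMap (k m : Int) (r : Nat) (fr : List (List Int × Int))
    (p : List Int × Int → Bool) (g : List Int × Int → List Int) :
    ((gp_iter k m r fr).filter p).map g
      = fr.flatMap (fun cs => ((gp_iter k m r [cs]).filter p).map g) := by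
  induction fr with
  | nil => simp [gp_iter_nil]
  | cons a fr ih =>
    rw [show a :: fr = [a] ++ fr from rfl, gp_iter_append, List.filter_append, List.map_append,
      List.flatMap_append, ih]
    simp

-- main invariant: with fuel = remaining depth + 1, A's recursion computes B's
-- level-by-level frontier after that many levels
theorem go_eq_iter (n k m : Int) : ∀ (r : Nat) (pattern : List Int),
    (pattern.length : Int) + r = n →
    generate_patterns_go n k m pattern (r + 1)
      = ((gp_iter k m r [(pattern, pySum pattern)]).filter
          (fun cs => decide (cs.2 = m))).map (fun cs => cs.1) := by
  intro r
  induction r with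
  | zero =>
    intro pattern h
    simp only [Nat.cast_zero, add_zero] at h
    rw [generate_patterns_go, if_pos h]
    by_cases hs : pySum pattern = m
    · rw [if_pos hs]; simp [gp_iter, hs]
    · rw [if_neg hs]; simp [gp_iter, hs]
  | succ r ih =>
    intro pattern h
    have hne : (pattern.length : Int) ≠ n := by push_cast at h ⊢; omega
    rw [generate_patterns_go, if_neg hne]
    rw [foldl_append_ite_list (PySem.List.pyRange 0 (k + 1) 1)
        (fun i => pySum pattern + i ≤ m)
        (fun i => generate_patterns_go n k m (pattern ++ [i]) (r + 1)) []]
    rw [List.nil_append]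
    have hcall : ∀ i ∈ (PySem.List.pyRange 0 (k + 1) 1).filter
        (fun i => decide (pySum pattern + i ≤ m)),
        generate_patterns_go n k m (pattern ++ [i]) (r + 1)
          = ((gp_iter k m r [(pattern ++ [i], pySum (pattern ++ [i]))]).filter
              (fun cs => decide (cs.2 = m))).map (fun cs => cs.1) := by
      intro i _
      apply ih
      push_cast at h ⊢; simp; omega
    rw [List.flatMap_congr hcall]
    -- RHS: push one level inside, then split the resulting frontier seed by seed
    rw [gp_iter_succ_inner, gp_iter_flatMap]
    rw [show gp_level k m [(pattern, pySum pattern)]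
        = ((PySem.List.pyRange 0 (k + 1) 1).filter
            (fun i => decide (pySum pattern + i ≤ m))).map
            (fun i => (pattern ++ [i], pySum pattern + i)) by simp [gp_level]]
    rw [List.flatMap_map]
    apply List.flatMap_congr
    intro i _
    have hsum : pySum (pattern ++ [i]) = pySum pattern + i := by
      rw [pySum_append, pySum_cons]; simp [pySum]
    simp [hsum]

-- ===== VERDICT (by name: the statement is the Claim_ definition above) =====
theorem generate_patterns_spec : Claim_equal_generate_patterns := by
  intro n k m pattern _ hpre
  unfold Spec_generate_patterns generate_patterns generate_patterns_alt
  by_cases hle : (pattern.length : Int) ≤ n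
  · -- in range: fuel = (n - len).toNat + 1 matches the invariant's depth
    have hr : (pattern.length : Int) + ((n - pattern.length).toNat : Int) = n := by
      omega
    rw [go_eq_iter n k m ((n - (pattern.length : Int)).toNat) pattern hr]
    rw [if_neg (by omega : ¬ n - (pattern.length : Int) < 0)]
    rw [gp_loop_eq_iter]
  · -- len > n: Pre_ forces sum(pattern) > m or k < 0; both sides are []
    have hfuel : (n - (pattern.length : Int)).toNat = 0 := by omega
    rw [hfuel, generate_patterns_go, if_neg (by omega : ¬ (pattern.length : Int) = n)]
    rw [if_pos (by omega : n - (pattern.length : Int) < 0)]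
    rcases hpre with h | h | h
    · omega
    · -- sum(pattern) > m: the pruning condition never holds (i ≥ 0)
      have : ∀ (l : List Int) (acc : List (List Int)), (∀ i ∈ l, 0 ≤ i) →
          l.foldl (fun acc i => if pySum pattern + i ≤ m then
            acc ++ generate_patterns_go n k m (pattern ++ [i]) 0 else acc) acc = acc := by
        intro l
        induction l with
        | nil => intro acc _; simp
        | cons a l ihl =>
          intro acc hnn
          simp only [List.foldl_cons]
          rw [if_neg (by have := hnn a (by simp); omega)]
          exact ihl acc (fun i hi => hnn i (by simp [hi]))
      exact this _ [] (fun i hi => (PySem.List.mem_pyRange_one.mp hi).1)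
    · -- k < 0: empty range
      rw [PySem.List.pyRange_one_eq_nil (by omega)]
      simp
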